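-- pv_equiv track=rewrite | github.com/saashimi/GIS_scripts | emme/emme_network_edit.py | network_parser
-- ===== SOURCE A (Python) =====
-- def network_parser(list_in, init_stop_in, end_stop_in):
--     # Parses ingested network file for location of init/end stops to edit.
--     # TODO: check edge case if multiple instances of init and end stops.
--     current_dwt = ''
--     current_ttf = ''
--     edit_network = []
--     init_index = list_in.index(init_stop_in)
--     end_index = list_in.index(end_stop_in) + 1
--     for item in list_in:
--         # Main dwt, ttf parser. Keeps current dwt, ttf values in memory for
--         # reinsertion after edited stops.
--         if 'dwt' in item:
--             current_dwt = item
--         if 'ttf' in item: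
--             current_ttf = item
--         if init_stop_in == item:
--             edit_network = list_in[init_index:end_index]
--     return edit_network, current_dwt, current_ttf, init_index, end_index
-- ===== SOURCE B (Python) =====
-- def network_parser(list_in, init_stop_in, end_stop_in):
--     # Slice the edit window directly from the two indices; find the last
--     # dwt/ttf entries by scanning from the end with early exit.
--     init_index = list_in.index(init_stop_in)
--     end_index = list_in.index(end_stop_in) + 1
--     edit_network = list_in[init_index:end_index]
--     current_dwt = next((x for x in reversed(list_in) if 'dwt' in x), '')
--     current_ttf = next((x for x in reversed(list_in) if 'ttf' in x), '')
--     return edit_network, current_dwt, current_ttf, init_index, end_index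
-- ===== Notes on version B (the rewrite author's own statement) =====
-- stated objective: simpler
-- what changed: Replaces the single forward overwrite-tracking pass (which re-slices on every occurrence of the init stop and keeps last-seen dwt/ttf in loop state) with a direct slice from the two indices plus two reversed early-exiting searches for the last dwt/ttf entries.
import Mathlib
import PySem

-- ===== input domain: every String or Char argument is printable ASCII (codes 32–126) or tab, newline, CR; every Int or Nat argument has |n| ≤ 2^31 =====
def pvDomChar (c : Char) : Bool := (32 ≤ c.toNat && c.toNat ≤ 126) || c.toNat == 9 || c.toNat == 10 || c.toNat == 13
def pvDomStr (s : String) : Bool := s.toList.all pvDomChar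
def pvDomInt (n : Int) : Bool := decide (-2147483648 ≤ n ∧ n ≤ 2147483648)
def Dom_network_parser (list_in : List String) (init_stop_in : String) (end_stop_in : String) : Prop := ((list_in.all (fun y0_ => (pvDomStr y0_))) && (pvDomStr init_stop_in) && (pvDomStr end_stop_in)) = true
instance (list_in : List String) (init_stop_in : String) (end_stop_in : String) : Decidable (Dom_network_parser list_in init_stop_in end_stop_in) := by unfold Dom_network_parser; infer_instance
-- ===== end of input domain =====

-- B replaces A's forward overwrite-tracking pass by a direct slice plus two reversed early-exiting searches (simpler decomposition, same cost).


-- ===== PORT A =====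
-- one loop step: dwt/ttf overwrite-tracking and re-slicing on every hit of the init stop
def pvStepA (list_in : List String) (init_stop_in : String) (init_index end_index : Int)
    (s : List String × String × String) (item : String) : List String × String × String :=
  ((if init_stop_in == item then PySem.List.slice list_in (some init_index) (some end_index) else s.1),
   (if PySem.Str.isIn "dwt" item then item else s.2.1),
   (if PySem.Str.isIn "ttf" item then item else s.2.2))

def network_parser (list_in : List String) (init_stop_in : String) (end_stop_in : String) : List String × String × String × Int × Int :=
  match PySem.List.index? list_in init_stop_in, PySem.List.index? list_in end_stop_in with
  | some ii, some ei =>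
    let init_index : Int := (ii : Int)
    let end_index : Int := (ei : Int) + 1
    let st := list_in.foldl (pvStepA list_in init_stop_in init_index end_index) ([], "", "")
    (st.1, st.2.1, st.2.2, init_index, end_index)
  | _, _ => ([], "", "", 0, 0)   -- Python raises ValueError here; excluded by Pre_

-- ===== PORT B =====
def network_parser_alt (list_in : List String) (init_stop_in : String) (end_stop_in : String) : List String × String × String × Int × Int :=
  match PySem.List.index? list_in init_stop_in with
  | none => ([], "", "", 0, 0)   -- Python raises ValueError here; excluded by Pre_
  | some ii =>
    match PySem.List.index? list_in end_stop_in with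
    | none => ([], "", "", 0, 0)   -- Python raises ValueError here; excluded by Pre_
    | some ei =>
      let init_index : Int := (ii : Int)
      let end_index : Int := (ei : Int) + 1
      let edit_network := PySem.List.slice list_in (some init_index) (some end_index)
      let current_dwt := (list_in.reverse.find? (fun x => PySem.Str.isIn "dwt" x)).getD ""
      let current_ttf := (list_in.reverse.find? (fun x => PySem.Str.isIn "ttf" x)).getD ""
      (edit_network, current_dwt, current_ttf, init_index, end_index)

-- ===== PRECONDITION & SPEC =====
-- Pre_ excludes exactly the inputs where list.index raises ValueError (a stop absent from the list).
def Pre_network_parser (list_in : List String) (init_stop_in : String) (end_stop_in : String) : Prop :=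
  init_stop_in ∈ list_in ∧ end_stop_in ∈ list_in
instance (list_in : List String) (init_stop_in : String) (end_stop_in : String) : Decidable (Pre_network_parser list_in init_stop_in end_stop_in) := by unfold Pre_network_parser; infer_instance

def pvWitness_network_parser : List String × String × String := (["dwt1", "s1", "ttf2", "s2"], "s1", "s2")

def Spec_network_parser (list_in : List String) (init_stop_in : String) (end_stop_in : String) (out : List String × String × String × Int × Int) : Prop := out = network_parser_alt list_in init_stop_in end_stop_in
instance (list_in : List String) (init_stop_in : String) (end_stop_in : String) (out : List String × String × String × Int × Int) : Decidable (Spec_network_parser list_in init_stop_in end_stop_in out) := by unfold Spec_network_parser; infer_instance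

-- ===== CLAIM (what is proved, stated in full; the proofs are below) =====
def Claim_equal_network_parser : Prop := ∀ (list_in : List String) (init_stop_in : String) (end_stop_in : String), Dom_network_parser list_in init_stop_in end_stop_in → Pre_network_parser list_in init_stop_in end_stop_in → Spec_network_parser list_in init_stop_in end_stop_in (network_parser list_in init_stop_in end_stop_in)

-- ===== LEMMAS AND PROOFS =====

-- closed form of a generic overwrite-tracking fold, for any predicates and any accumulator
lemma pvFold_eq (S : List String) (f pd pt : String → Bool) (l : List String)
    (acc : List String × String × String) :
    l.foldl (fun s item =>
        ((if f item then S else s.1),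
         (if pd item then item else s.2.1),
         (if pt item then item else s.2.2))) acc =
      ((if l.any f then S else acc.1),
       ((l.reverse.find? pd).getD acc.2.1),
       ((l.reverse.find? pt).getD acc.2.2)) := by
  induction l generalizing acc with
  | nil => simp
  | cons x xs ih =>
    rw [List.foldl_cons, ih]
    refine Prod.ext ?_ (Prod.ext ?_ ?_)
    · by_cases hx : f x = true <;> simp [hx]
    · cases hd : xs.reverse.find? pd <;> by_cases hc : pd x = true <;>
        simp [List.find?_append, hd, hc]
    · cases ht : xs.reverse.find? pt <;> by_cases hc : pt x = true <;>
        simp [List.find?_append, ht, hc]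

-- A's loop is an instance of that fold
lemma pvFoldA_eq (list_in : List String) (i : String) (a b : Int)
    (l : List String) (acc : List String × String × String) :
    l.foldl (pvStepA list_in i a b) acc =
      ((if l.any (fun item => i == item) then PySem.List.slice list_in (some a) (some b) else acc.1),
       ((l.reverse.find? (fun x => PySem.Str.isIn "dwt" x)).getD acc.2.1),
       ((l.reverse.find? (fun x => PySem.Str.isIn "ttf" x)).getD acc.2.2)) :=
  pvFold_eq (PySem.List.slice list_in (some a) (some b))
    (fun item => i == item) (fun x => PySem.Str.isIn "dwt" x) (fun x => PySem.Str.isIn "ttf" x) l acc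

theorem network_parser_spec : Claim_equal_network_parser := by
  intro list_in i e _ hpre
  obtain ⟨hi, he⟩ := hpre
  have hii : (PySem.List.index? list_in i).isSome := (PySem.List.index?_isSome_iff _ _).mpr hi
  have hee : (PySem.List.index? list_in e).isSome := (PySem.List.index?_isSome_iff _ _).mpr he
  obtain ⟨ii, hii⟩ := Option.isSome_iff_exists.mp hii
  obtain ⟨ei, hee⟩ := Option.isSome_iff_exists.mp hee
  unfold Spec_network_parser network_parser network_parser_alt
  rw [hii, hee]
  simp only []
  rw [pvFoldA_eq]
  have hany : list_in.any (fun item => i == item) = true := by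
    simp only [List.any_eq_true, beq_iff_eq]
    exact ⟨i, hi, rfl⟩
  simp [hany]
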